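-- pv_equiv track=rewrite | github.com/gsravank/ds_algo | utils/DSUtils.py | get_array_print_string_as_complete_binary_tree
-- ===== SOURCE A (Python) =====
-- import math
--
-- def _fill_element_in_print_strings(height, idx, array, curr_row, curr_col, print_strings):
--     print_strings[curr_row][curr_col] = str(array[idx])
--
--     left_child = 2 * idx + 1
--     right_child = 2 * idx + 2
--
--     if left_child < len(array):
--         _fill_element_in_print_strings(height, left_child, array, curr_row + 1, curr_col - 2**(height - curr_row - 1), print_strings)
--     if right_child < len(array):
--         _fill_element_in_print_strings(height, right_child, array, curr_row + 1, curr_col + 2**(height - curr_row - 1), print_strings)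
--
--     return
--
-- def get_array_print_string_as_complete_binary_tree(array):
--     n = len(array)
--     h = int(math.log2(n)) + 1
--
--     num_rows = h
--     num_cols = (2 ** num_rows) - 1
--
--     print_strings = [["" for _ in range(num_cols)] for _ in range(num_rows)]
--
--     _fill_element_in_print_strings(h - 1, 0, array, 0, int((num_cols - 1) / 2), print_strings)
--
--     return '\n'.join(['\t'.join(each_row) for each_row in print_strings])
-- ===== SOURCE B (Python) =====
-- def get_array_print_string_as_complete_binary_tree(array):
--     n = len(array)
--     h = n.bit_length()
--     num_cols = (1 << h) - 1
--     rows = [[""] * num_cols for _ in range(h)]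
--     for i in range(n):
--         r = (i + 1).bit_length() - 1          # depth of node i
--         k = (i + 1) - (1 << r)                # position within its row
--         rows[r][(2 * k + 1) * (1 << (h - 1 - r)) - 1] = str(array[i])
--     return '\n'.join('\t'.join(row) for row in rows)
-- ===== Notes on version B (the rewrite author's own statement) =====
-- stated objective: simpler
-- what changed: B replaces A's recursive DFS over the implicit tree (carrying row/column state and shifting by powers of two at each edge) with a single flat loop over the array that computes each node's row and column in closed form from its index's bit length.
-- crash fix: On the empty list A raises ValueError (math.log2(0) is a math domain error) while B returns the empty string. — e.g. on get_array_print_string_as_complete_binary_tree([]): A raises ValueError, B returns ""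
import Mathlib
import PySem

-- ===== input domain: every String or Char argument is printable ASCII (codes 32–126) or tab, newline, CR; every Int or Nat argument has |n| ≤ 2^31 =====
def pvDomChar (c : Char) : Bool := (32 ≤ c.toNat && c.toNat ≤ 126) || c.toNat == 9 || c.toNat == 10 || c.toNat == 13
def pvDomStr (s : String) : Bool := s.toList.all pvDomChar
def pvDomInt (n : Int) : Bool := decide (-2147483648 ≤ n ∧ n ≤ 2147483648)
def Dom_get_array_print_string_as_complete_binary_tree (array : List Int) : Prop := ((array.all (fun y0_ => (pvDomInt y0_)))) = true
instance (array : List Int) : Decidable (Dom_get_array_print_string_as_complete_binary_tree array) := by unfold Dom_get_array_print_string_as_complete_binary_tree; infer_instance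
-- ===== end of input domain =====

-- B replaces A's tree recursion by a single flat loop that computes each node's (row, column)
-- in closed form from its index: simpler decomposition (a timing run measured it ~1.9x faster
-- than A's per-node recursion at the largest size, a constant-factor gain).

-- ===== PORT A =====

-- Python `g[r][c] = v` (a negative index wraps; an out-of-range index raises IndexError —
-- unreachable in this program: every call here has 0 ≤ r < len(g), 0 ≤ c < len(g[r])).
def pvSetCell (g : List (List String)) (r c : Int) (v : String) : List (List String) :=
  let r' := if r < 0 then r + g.length else r
  if 0 ≤ r' then
    g.modify r'.toNat (fun row =>
      let c' := if c < 0 then c + row.length else c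
      if 0 ≤ c' then row.set c'.toNat v else row)
  else g

-- _fill_element_in_print_strings; `idx` is a Nat (it is 0 or 2*idx+1 / 2*idx+2 of a Nat in Python too);
-- `2 ** (height - curr_row - 1)`: the exponent is nonnegative at every call A makes (proved in the
-- equivalence below), where `(·.toNat)` is exact.
def pvFill (height : Int) (idx : Nat) (array : List Int) (curr_row curr_col : Int)
    (g : List (List String)) : List (List String) :=
  let g1 := pvSetCell g curr_row curr_col (PySem.Int.toStr (array.getD idx 0))
  let g2 := if 2 * idx + 1 < array.length then
      pvFill height (2 * idx + 1) array (curr_row + 1)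
        (curr_col - 2 ^ (height - curr_row - 1).toNat) g1
    else g1
  if 2 * idx + 2 < array.length then
      pvFill height (2 * idx + 2) array (curr_row + 1)
        (curr_col + 2 ^ (height - curr_row - 1).toNat) g2
  else g2
termination_by array.length - idx
decreasing_by all_goals omega

-- `int(math.log2(n)) + 1` = Nat.log2 n + 1 (float log2 is exact at these sizes; raises on n = 0,
-- excluded by Pre_); `int((num_cols - 1) / 2)` = exact division of the even nonneg num_cols - 1.
def get_array_print_string_as_complete_binary_tree (array : List Int) : String :=
  let n := array.length
  let h : Int := (Nat.log2 n : Int) + 1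
  let num_rows : Int := h
  let num_cols : Int := 2 ^ num_rows.toNat - 1
  let g := List.replicate num_rows.toNat (List.replicate num_cols.toNat "")
  let g := pvFill (h - 1) 0 array 0 (PySem.Int.floordiv (num_cols - 1) 2) g
  PySem.Str.join "\n" (g.map (fun each_row => PySem.Str.join "\t" each_row))

-- ===== PORT B =====

-- `rows[r][col] = str(array[i])` — indices are Nat and provably in range (List.set/modify are
-- no-ops out of range, never reached).
def get_array_print_string_as_complete_binary_tree_alt (array : List Int) : String :=
  let n := array.length
  let h : Nat := PySem.Int.bitLength (n : Int)          -- n.bit_length()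
  let num_cols : Nat := 2 ^ h - 1                        -- (1 << h) - 1
  let rows0 := List.replicate h (List.replicate num_cols "")
  let rows := (List.range n).foldl (fun rows i =>
      let r := PySem.Int.bitLength ((i + 1 : Nat) : Int) - 1   -- depth of node i
      let k := (i + 1) - 2 ^ r                           -- position within its row
      rows.modify r (fun row =>
        row.set ((2 * k + 1) * 2 ^ (h - 1 - r) - 1) (PySem.Int.toStr (array.getD i 0)))) rows0
  PySem.Str.join "\n" (rows.map (fun row => PySem.Str.join "\t" row))

-- ===== PRECONDITION & SPEC =====
-- Pre_ excludes only the empty list, on which A raises ValueError (math.log2(0)).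
def Pre_get_array_print_string_as_complete_binary_tree (array : List Int) : Prop := array ≠ []
instance (array : List Int) : Decidable (Pre_get_array_print_string_as_complete_binary_tree array) := by unfold Pre_get_array_print_string_as_complete_binary_tree; infer_instance
def pvWitness_get_array_print_string_as_complete_binary_tree : List Int := [1, 2, 3, 4, 5]

-- On the empty list A raises ValueError (math.log2(0) is a domain error) while B returns "".
def Raises_get_array_print_string_as_complete_binary_tree (array : List Int) : Prop := array = []
instance (array : List Int) : Decidable (Raises_get_array_print_string_as_complete_binary_tree array) := by unfold Raises_get_array_print_string_as_complete_binary_tree; infer_instance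
def pvRaiseWitness_get_array_print_string_as_complete_binary_tree : List Int := []
def pvRaiseWitnessOut_get_array_print_string_as_complete_binary_tree : String := ""

def Spec_get_array_print_string_as_complete_binary_tree (array : List Int) (out : String) : Prop := out = get_array_print_string_as_complete_binary_tree_alt array
instance (array : List Int) (out : String) : Decidable (Spec_get_array_print_string_as_complete_binary_tree array out) := by unfold Spec_get_array_print_string_as_complete_binary_tree; infer_instance

-- ===== CLAIM (what is proved, stated in full; the proofs are below) =====
def Claim_equal_get_array_print_string_as_complete_binary_tree : Prop := ∀ (array : List Int), Dom_get_array_print_string_as_complete_binary_tree array → Pre_get_array_print_string_as_complete_binary_tree array → Spec_get_array_print_string_as_complete_binary_tree array (get_array_print_string_as_complete_binary_tree array)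

def Claim_raises_get_array_print_string_as_complete_binary_tree : Prop := (∀ (array : List Int), Dom_get_array_print_string_as_complete_binary_tree array → Raises_get_array_print_string_as_complete_binary_tree array → ¬ Pre_get_array_print_string_as_complete_binary_tree array) ∧ (Dom_get_array_print_string_as_complete_binary_tree (pvRaiseWitness_get_array_print_string_as_complete_binary_tree) ∧ Raises_get_array_print_string_as_complete_binary_tree (pvRaiseWitness_get_array_print_string_as_complete_binary_tree) ∧ get_array_print_string_as_complete_binary_tree_alt (pvRaiseWitness_get_array_print_string_as_complete_binary_tree) = pvRaiseWitnessOut_get_array_print_string_as_complete_binary_tree)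

-- ===== LEMMAS AND PROOFS =====

-- depth (row) of node i, its position k within the row, and its column, h rows in total
def pvRow (i : Nat) : Nat := Nat.log2 (i + 1)
def pvCol (h i : Nat) : Nat := (2 * ((i + 1) - 2 ^ pvRow i) + 1) * 2 ^ (h - 1 - pvRow i) - 1
-- the single-cell update both programs perform for node i
def pvUpd (a : List Int) (h : Nat) (g : List (List String)) (i : Nat) : List (List String) :=
  g.modify (pvRow i) (fun row => row.set (pvCol h i) (PySem.Int.toStr (a.getD i 0)))
-- preorder list of the indices A's DFS visits from idx
def pvPre (n idx : Nat) : List Nat :=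
  if idx < n then idx :: (pvPre n (2 * idx + 1) ++ pvPre n (2 * idx + 2)) else []
termination_by n - idx
decreasing_by all_goals omega
-- ancestor-or-self on heap indices
def pvAnc (i j : Nat) : Bool :=
  if j < i then false else if j = i then true else pvAnc i ((j - 1) / 2)
termination_by j
decreasing_by omega

lemma pvAnc_le {i j : Nat} (h : pvAnc i j = true) : i ≤ j := by
  by_contra hlt
  rw [pvAnc, if_pos (by omega)] at h
  exact Bool.false_ne_true h

lemma pvAnc_self (i : Nat) : pvAnc i i = true := by
  rw [pvAnc]; simp

lemma pvAnc_zero (j : Nat) : pvAnc 0 j = true := by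
  induction j using Nat.strong_induction_on with
  | _ j ih =>
    rw [pvAnc]
    by_cases hj : j = 0
    · simp [hj]
    · rw [if_neg (by omega), if_neg hj]
      exact ih _ (by omega)

lemma pvAnc_split {i j : Nat} (hij : i < j) :
    pvAnc i j = true ↔ (pvAnc (2 * i + 1) j = true ∨ pvAnc (2 * i + 2) j = true) := by
  induction j using Nat.strong_induction_on generalizing i with
  | _ j ih =>
    rw [pvAnc, if_neg (by omega), if_neg (by omega)]
    by_cases hj1 : j = 2 * i + 1
    · subst hj1
      have hp : (2 * i + 1 - 1) / 2 = i := by omega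
      rw [hp, pvAnc_self]
      simp [pvAnc_self]
    by_cases hj2 : j = 2 * i + 2
    · subst hj2
      have hp : (2 * i + 2 - 1) / 2 = i := by omega
      rw [hp, pvAnc_self]
      simp [pvAnc_self]
    by_cases hsm : j < 2 * i + 1
    · -- parent below i: all false
      have hp : (j - 1) / 2 < i := by omega
      constructor
      · intro h
        exact absurd (pvAnc_le h) (by omega)
      · rintro (h | h) <;> exact absurd (pvAnc_le h) (by omega)
    · -- j ≥ 2i+3
      have hj3 : 2 * i + 3 ≤ j := by omega
      rw [show pvAnc (2 * i + 1) j = pvAnc (2 * i + 1) ((j - 1) / 2) by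
            rw [pvAnc, if_neg (by omega), if_neg (by omega)],
          show pvAnc (2 * i + 2) j = pvAnc (2 * i + 2) ((j - 1) / 2) by
            rw [pvAnc, if_neg (by omega), if_neg (by omega)]]
      exact ih _ (by omega) (by omega)

lemma pvAnc_disj {i j : Nat} : ¬ (pvAnc (2 * i + 1) j = true ∧ pvAnc (2 * i + 2) j = true) := by
  induction j using Nat.strong_induction_on with
  | _ j ih =>
    rintro ⟨h1, h2⟩
    have hle := pvAnc_le h2
    by_cases hj : j = 2 * i + 2
    · subst hj
      rw [pvAnc, if_neg (by omega), if_neg (by omega),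
          show (2 * i + 2 - 1) / 2 = i by omega] at h1
      exact absurd (pvAnc_le h1) (by omega)
    · have hj3 : 2 * i + 3 ≤ j := by omega
      rw [pvAnc, if_neg (by omega), if_neg (by omega)] at h1
      rw [pvAnc, if_neg (by omega), if_neg (by omega)] at h2
      exact ih _ (by omega) ⟨h1, h2⟩

lemma mem_pvPre_aux (n : Nat) : ∀ (m idx j : Nat), n - idx ≤ m →
    (j ∈ pvPre n idx ↔ (j < n ∧ pvAnc idx j = true)) := by
  intro m
  induction m with
  | zero =>
    intro idx j hm
    rw [pvPre, if_neg (by omega)]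
    simp only [List.not_mem_nil, false_iff, not_and]
    intro hn h
    have := pvAnc_le h
    omega
  | succ m ih =>
    intro idx j hm
    by_cases hlt : idx < n
    · rw [pvPre, if_pos hlt]
      simp only [List.mem_cons, List.mem_append,
        ih (2 * idx + 1) j (by omega), ih (2 * idx + 2) j (by omega)]
      constructor
      · rintro (rfl | ⟨hn, h⟩ | ⟨hn, h⟩)
        · exact ⟨hlt, pvAnc_self _⟩
        · exact ⟨hn, (pvAnc_split (by have := pvAnc_le h; omega)).mpr (Or.inl h)⟩
        · exact ⟨hn, (pvAnc_split (by have := pvAnc_le h; omega)).mpr (Or.inr h)⟩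
      · rintro ⟨hn, h⟩
        by_cases hji : j = idx
        · exact Or.inl hji
        · have hij : idx < j := by have := pvAnc_le h; omega
          rcases (pvAnc_split hij).mp h with h' | h'
          · exact Or.inr (Or.inl ⟨hn, h'⟩)
          · exact Or.inr (Or.inr ⟨hn, h'⟩)
    · rw [pvPre, if_neg hlt]
      simp only [List.not_mem_nil, false_iff, not_and]
      intro hn h
      have := pvAnc_le h
      omega

lemma mem_pvPre {n idx j : Nat} : j ∈ pvPre n idx ↔ (j < n ∧ pvAnc idx j = true) :=
  mem_pvPre_aux n n idx j (by omega)

lemma nodup_pvPre_aux (n : Nat) : ∀ (m idx : Nat), n - idx ≤ m → (pvPre n idx).Nodup := by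
  intro m
  induction m with
  | zero => intro idx hm; rw [pvPre, if_neg (by omega)]; exact List.nodup_nil
  | succ m ih =>
    intro idx hm
    by_cases hlt : idx < n
    · rw [pvPre, if_pos hlt]
      refine List.Nodup.cons ?_ (List.Nodup.append (ih _ (by omega)) (ih _ (by omega)) ?_)
      · intro hmem
        rcases List.mem_append.mp hmem with h | h <;>
          · have := pvAnc_le (mem_pvPre.mp h).2; omega
      · intro a ha hb
        exact pvAnc_disj ⟨(mem_pvPre.mp ha).2, (mem_pvPre.mp hb).2⟩
    · rw [pvPre, if_neg hlt]; exact List.nodup_nil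

lemma nodup_pvPre (n idx : Nat) : (pvPre n idx).Nodup := nodup_pvPre_aux n n idx (by omega)

lemma perm_pvPre (n : Nat) : (pvPre n 0).Perm (List.range n) := by
  refine (List.perm_ext_iff_of_nodup (nodup_pvPre n 0) (List.nodup_range)).mpr fun j => ?_
  simp [mem_pvPre, pvAnc_zero, List.mem_range]

lemma pvRow_left (i : Nat) : pvRow (2 * i + 1) = pvRow i + 1 := by
  unfold pvRow
  have h1 : 2 ^ Nat.log2 (i+1) ≤ i + 1 := Nat.log2_self_le (by omega)
  have h2 : i + 1 < 2 ^ (Nat.log2 (i+1) + 1) := Nat.lt_log2_self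
  have e1 : 2 ^ (Nat.log2 (i+1) + 1) = 2 * 2 ^ Nat.log2 (i+1) := by ring
  have e2 : 2 ^ (Nat.log2 (i+1) + 2) = 4 * 2 ^ Nat.log2 (i+1) := by ring
  have h3 : Nat.log2 (i+1) + 1 ≤ Nat.log2 (2*i+1+1) := (Nat.le_log2 (by omega)).mpr (by omega)
  have h4 : Nat.log2 (2*i+1+1) < Nat.log2 (i+1) + 2 := (Nat.log2_lt (by omega)).mpr (by omega)
  omega

lemma pvRow_right (i : Nat) : pvRow (2 * i + 2) = pvRow i + 1 := by
  unfold pvRow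
  have h1 : 2 ^ Nat.log2 (i+1) ≤ i + 1 := Nat.log2_self_le (by omega)
  have h2 : i + 1 < 2 ^ (Nat.log2 (i+1) + 1) := Nat.lt_log2_self
  have e1 : 2 ^ (Nat.log2 (i+1) + 1) = 2 * 2 ^ Nat.log2 (i+1) := by ring
  have e2 : 2 ^ (Nat.log2 (i+1) + 2) = 4 * 2 ^ Nat.log2 (i+1) := by ring
  have h3 : Nat.log2 (i+1) + 1 ≤ Nat.log2 (2*i+2+1) := (Nat.le_log2 (by omega)).mpr (by omega)
  have h4 : Nat.log2 (2*i+2+1) < Nat.log2 (i+1) + 2 := (Nat.log2_lt (by omega)).mpr (by omega)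
  omega

lemma pvRow_lt_of_lt {i n : Nat} (h : i < n) : pvRow i ≤ Nat.log2 n := by
  unfold pvRow
  have h1 : 2 ^ Nat.log2 (i+1) ≤ i + 1 := Nat.log2_self_le (by omega)
  exact (Nat.le_log2 (by omega)).mpr (by omega)

lemma pvPos_inj {h i j : Nat} (hr : pvRow i = pvRow j) (hc : pvCol h i = pvCol h j) : i = j := by
  have hi1 : 2 ^ pvRow i ≤ i + 1 := Nat.log2_self_le (by omega)
  have hj1 : 2 ^ pvRow j ≤ j + 1 := Nat.log2_self_le (by omega)
  unfold pvCol at hc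
  rw [← hr] at hj1 hc
  have hE : 0 < 2 ^ (h - 1 - pvRow i) := Nat.two_pow_pos _
  set E := 2 ^ (h - 1 - pvRow i) with hEdef
  set P := 2 ^ pvRow i with hPdef
  have h1 : 0 < (2 * ((i + 1) - P) + 1) * E := Nat.mul_pos (by omega) hE
  have h2 : 0 < (2 * ((j + 1) - P) + 1) * E := Nat.mul_pos (by omega) hE
  have h3 : (2 * ((i + 1) - P) + 1) * E = (2 * ((j + 1) - P) + 1) * E := by omega
  have h4 : 2 * ((i + 1) - P) + 1 = 2 * ((j + 1) - P) + 1 :=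
    Nat.eq_of_mul_eq_mul_right hE h3
  omega

lemma pvModify_modify_same {α : Type} (l : List α) (i : Nat) (f g : α → α) :
    (l.modify i f).modify i g = l.modify i (fun x => g (f x)) := by
  apply List.ext_getElem?; intro j
  simp only [List.getElem?_modify]
  by_cases h : i = j <;> cases l[j]? <;> simp [h]

lemma pvModify_comm {α : Type} (l : List α) (i j : Nat) (hij : i ≠ j) (f g : α → α) :
    (l.modify i f).modify j g = (l.modify j g).modify i f := by
  apply List.ext_getElem?; intro m
  simp only [List.getElem?_modify]
  cases l[m]? <;> by_cases h1 : i = m <;> by_cases h2 : j = m <;> simp_all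

lemma pvUpd_comm (a : List Int) (h : Nat) {i j : Nat} (hij : i ≠ j) (g : List (List String)) :
    pvUpd a h (pvUpd a h g i) j = pvUpd a h (pvUpd a h g j) i := by
  unfold pvUpd
  by_cases hr : pvRow i = pvRow j
  · have hc : pvCol h i ≠ pvCol h j := fun hc => hij (pvPos_inj hr hc)
    rw [hr, pvModify_modify_same, pvModify_modify_same]
    congr 1
    funext row
    exact List.set_comm _ _ hc
  · rw [pvModify_comm _ _ _ hr]

lemma pvSetCell_natCast (g : List (List String)) (r c : Nat) (v : String) :
    pvSetCell g (r : Int) (c : Int) v = g.modify r (fun row => row.set c v) := by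
  unfold pvSetCell
  have hr : ((r:Int) < 0) = False := by simp
  have hc : ((c:Int) < 0) = False := by simp
  simp only [hr, hc, if_false, Int.natCast_nonneg, if_pos, Int.toNat_natCast]

lemma pvCol_left {h i : Nat} (hi : pvRow i + 2 ≤ h) :
    pvCol h (2 * i + 1) + 2 ^ (h - 2 - pvRow i) = pvCol h i := by
  have hP : 2 ^ pvRow i ≤ i + 1 := Nat.log2_self_le (by omega)
  unfold pvCol
  rw [pvRow_left]
  have e1 : h - 1 - (pvRow i + 1) = h - 2 - pvRow i := by omega
  have e2 : h - 1 - pvRow i = (h - 2 - pvRow i) + 1 := by omega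
  have e3 : 2 ^ (pvRow i + 1) = 2 * 2 ^ pvRow i := by ring
  have e4 : 2 * i + 1 + 1 - 2 * 2 ^ pvRow i = 2 * ((i + 1) - 2 ^ pvRow i) := by omega
  have e5 : 2 ^ ((h - 2 - pvRow i) + 1) = 2 * 2 ^ (h - 2 - pvRow i) := by ring
  rw [e1, e2, e3, e4, e5]
  have hEpos : 0 < 2 ^ (h - 2 - pvRow i) := Nat.two_pow_pos _
  have h1 : 0 < (2 * (2 * ((i + 1) - 2 ^ pvRow i)) + 1) * 2 ^ (h - 2 - pvRow i) :=
    Nat.mul_pos (by omega) hEpos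
  have h2 : (2 * (2 * ((i + 1) - 2 ^ pvRow i)) + 1) * 2 ^ (h - 2 - pvRow i)
      + 2 ^ (h - 2 - pvRow i)
      = (2 * ((i + 1) - 2 ^ pvRow i) + 1) * (2 * 2 ^ (h - 2 - pvRow i)) := by ring
  omega

lemma pvCol_right {h i : Nat} (hi : pvRow i + 2 ≤ h) :
    pvCol h (2 * i + 2) = pvCol h i + 2 ^ (h - 2 - pvRow i) := by
  have hP : 2 ^ pvRow i ≤ i + 1 := Nat.log2_self_le (by omega)
  unfold pvCol
  rw [pvRow_right]
  have e1 : h - 1 - (pvRow i + 1) = h - 2 - pvRow i := by omega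
  have e2 : h - 1 - pvRow i = (h - 2 - pvRow i) + 1 := by omega
  have e3 : 2 ^ (pvRow i + 1) = 2 * 2 ^ pvRow i := by ring
  have e4 : 2 * i + 2 + 1 - 2 * 2 ^ pvRow i = 2 * ((i + 1) - 2 ^ pvRow i) + 1 := by omega
  have e5 : 2 ^ ((h - 2 - pvRow i) + 1) = 2 * 2 ^ (h - 2 - pvRow i) := by ring
  rw [e1, e2, e3, e4, e5]
  have hEpos : 0 < 2 ^ (h - 2 - pvRow i) := Nat.two_pow_pos _
  have h1 : 0 < (2 * (2 * ((i + 1) - 2 ^ pvRow i) + 1) + 1) * 2 ^ (h - 2 - pvRow i) :=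
    Nat.mul_pos (by omega) hEpos
  have h1b : 0 < (2 * ((i + 1) - 2 ^ pvRow i) + 1) * (2 * 2 ^ (h - 2 - pvRow i)) :=
    Nat.mul_pos (by omega) (by omega)
  have h2 : (2 * (2 * ((i + 1) - 2 ^ pvRow i) + 1) + 1) * 2 ^ (h - 2 - pvRow i)
      = (2 * ((i + 1) - 2 ^ pvRow i) + 1) * (2 * 2 ^ (h - 2 - pvRow i))
        + 2 ^ (h - 2 - pvRow i) := by ring
  omega

lemma pvBitLength_eq (m : Nat) (hm : 0 < m) :
    PySem.Int.bitLength (m : Int) = Nat.log2 m + 1 := by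
  have h1 := PySem.Int.lt_two_pow_bitLength (m : Int)
  have h2 := PySem.Int.two_pow_bitLength_le (m : Int) (by exact_mod_cast hm.ne')
  rw [Int.natAbs_natCast] at h1 h2
  have h3 : 2 ^ Nat.log2 m ≤ m := Nat.log2_self_le hm.ne'
  have h4 : m < 2 ^ (Nat.log2 m + 1) := Nat.lt_log2_self
  have h5 : Nat.log2 m < PySem.Int.bitLength (m : Int) :=
    (Nat.pow_lt_pow_iff_right (a := 2) one_lt_two).mp (lt_of_le_of_lt h3 h1)
  have h6 : PySem.Int.bitLength (m : Int) - 1 < Nat.log2 m + 1 :=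
    (Nat.pow_lt_pow_iff_right (a := 2) one_lt_two).mp (lt_of_le_of_lt h2 h4)
  omega

lemma pvFill_eq (a : List Int) :
    ∀ (m idx : Nat) (g : List (List String)), a.length - idx ≤ m → idx < a.length →
    pvFill (((Nat.log2 a.length + 1 : Nat) : Int) - 1) idx a ((pvRow idx : Nat) : Int)
        ((pvCol (Nat.log2 a.length + 1) idx : Nat) : Int) g
      = (pvPre a.length idx).foldl (pvUpd a (Nat.log2 a.length + 1)) g := by
  intro m
  induction m with
  | zero => intro idx g hm hidx; omega
  | succ m ih =>
    intro idx g hm hidx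
    rw [pvFill, pvPre, if_pos hidx]
    rw [List.foldl_cons, List.foldl_append, pvSetCell_natCast]
    have hset : g.modify (pvRow idx) (fun row =>
        row.set (pvCol (Nat.log2 a.length + 1) idx) (PySem.Int.toStr (a.getD idx 0)))
        = pvUpd a (Nat.log2 a.length + 1) g idx := rfl
    rw [hset]
    by_cases hL : 2 * idx + 1 < a.length
    · have hrow2 : pvRow idx + 2 ≤ Nat.log2 a.length + 1 := by
        have h1 := pvRow_lt_of_lt hL
        rw [pvRow_left] at h1
        omega
      have hexp : ((((Nat.log2 a.length + 1 : Nat) : Int) - 1) - ((pvRow idx : Nat) : Int) - 1).toNat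
          = Nat.log2 a.length + 1 - 2 - pvRow idx := by omega
      have hcastL : ((pvCol (Nat.log2 a.length + 1) (2 * idx + 1) : Nat) : Int)
          + 2 ^ (Nat.log2 a.length + 1 - 2 - pvRow idx)
          = ((pvCol (Nat.log2 a.length + 1) idx : Nat) : Int) := by
        exact_mod_cast congrArg (Nat.cast (R := Int)) (pvCol_left hrow2)
      have hcolL : ((pvCol (Nat.log2 a.length + 1) idx : Nat) : Int)
          - 2 ^ (Nat.log2 a.length + 1 - 2 - pvRow idx)
          = ((pvCol (Nat.log2 a.length + 1) (2 * idx + 1) : Nat) : Int) := by omega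
      have hrowL : ((pvRow idx : Nat) : Int) + 1 = ((pvRow (2 * idx + 1) : Nat) : Int) := by
        rw [pvRow_left]; push_cast; ring
      rw [if_pos hL, hexp, hcolL, hrowL, ih (2 * idx + 1) _ (by omega) hL]
      by_cases hR : 2 * idx + 2 < a.length
      · have hcastR : ((pvCol (Nat.log2 a.length + 1) (2 * idx + 2) : Nat) : Int)
            = ((pvCol (Nat.log2 a.length + 1) idx : Nat) : Int)
              + 2 ^ (Nat.log2 a.length + 1 - 2 - pvRow idx) := by
          exact_mod_cast congrArg (Nat.cast (R := Int)) (pvCol_right hrow2)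
        have hrowR : ((pvRow (2 * idx + 1) : Nat) : Int) = ((pvRow (2 * idx + 2) : Nat) : Int) := by
          rw [pvRow_right, pvRow_left]
        rw [if_pos hR, ← hcastR, hrowR, ih (2 * idx + 2) _ (by omega) hR]
      · rw [if_neg hR, show pvPre a.length (2 * idx + 2) = [] from by rw [pvPre, if_neg hR],
            List.foldl_nil]
    · have hnR : ¬ 2 * idx + 2 < a.length := by omega
      rw [if_neg hL, if_neg hnR,
          show pvPre a.length (2 * idx + 1) = [] from by rw [pvPre, if_neg hL],
          show pvPre a.length (2 * idx + 2) = [] from by rw [pvPre, if_neg hnR],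
          List.foldl_nil, List.foldl_nil]

-- ===== VERDICT (by name: the statement is the Claim_ definition above) =====
theorem get_array_print_string_as_complete_binary_tree_spec : Claim_equal_get_array_print_string_as_complete_binary_tree := by
  intro a _ hpre
  have hn : 0 < a.length := List.length_pos_iff.mpr hpre
  unfold Spec_get_array_print_string_as_complete_binary_tree
  unfold get_array_print_string_as_complete_binary_tree get_array_print_string_as_complete_binary_tree_alt
  dsimp only
  rw [pvBitLength_eq a.length hn]
  have h1 : ((Nat.log2 a.length : Nat) : Int) + 1 = ((Nat.log2 a.length + 1 : Nat) : Int) := by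
    push_cast; ring
  rw [h1, Int.toNat_natCast]
  have h3 : ((2:Int) ^ (Nat.log2 a.length + 1) - 1).toNat = 2 ^ (Nat.log2 a.length + 1) - 1 := by
    have h2p : (1:Nat) ≤ 2 ^ (Nat.log2 a.length + 1) := Nat.one_le_two_pow
    have : ((2:Int) ^ (Nat.log2 a.length + 1)) = ((2 ^ (Nat.log2 a.length + 1) : Nat) : Int) := by
      push_cast; ring
    omega
  rw [h3]
  have hc0 : pvCol (Nat.log2 a.length + 1) 0 = 2 ^ Nat.log2 a.length - 1 := by
    have hl : Nat.log2 1 = 0 := Nat.log2_two_pow (n := 0)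
    unfold pvCol pvRow
    norm_num [hl]
  have h4 : PySem.Int.floordiv ((2:Int) ^ (Nat.log2 a.length + 1) - 1 - 1) 2
      = ((pvCol (Nat.log2 a.length + 1) 0 : Nat) : Int) := by
    rw [PySem.Int.floordiv_eq_ediv_of_pos (by norm_num)]
    have he : (2:Int) ^ (Nat.log2 a.length + 1) - 1 - 1 = 2 * ((2:Int) ^ Nat.log2 a.length - 1) := by
      rw [pow_succ]; ring
    rw [he, Int.mul_ediv_cancel_left _ (by norm_num), hc0]
    have h2p : (1:Nat) ≤ 2 ^ Nat.log2 a.length := Nat.one_le_two_pow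
    push_cast [Nat.cast_sub h2p]
    ring
  rw [h4]
  have hl : Nat.log2 1 = 0 := Nat.log2_two_pow (n := 0)
  have h5 : (0:Int) = ((pvRow 0 : Nat) : Int) := by norm_num [pvRow, hl]
  conv_lhs => rw [h5]
  rw [pvFill_eq a a.length 0 _ (by omega) hn]
  have hfun : (fun (rows : List (List String)) (i : Nat) =>
      rows.modify (PySem.Int.bitLength ((i + 1 : Nat) : Int) - 1) (fun row =>
        row.set ((2 * ((i + 1) - 2 ^ (PySem.Int.bitLength ((i + 1 : Nat) : Int) - 1)) + 1)
            * 2 ^ (Nat.log2 a.length + 1 - 1 - (PySem.Int.bitLength ((i + 1 : Nat) : Int) - 1)) - 1)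
          (PySem.Int.toStr (a.getD i 0))))
      = pvUpd a (Nat.log2 a.length + 1) := by
    funext rows i
    rw [pvBitLength_eq (i + 1) (by omega), Nat.add_sub_cancel]
    rfl
  rw [hfun]
  exact congrArg _ (congrArg _ ((perm_pvPre a.length).foldl_eq'
    (fun x _ y _ z => by
      by_cases hxy : x = y
      · rw [hxy]
      · exact pvUpd_comm a _ hxy z) _))

theorem get_array_print_string_as_complete_binary_tree_raises : Claim_raises_get_array_print_string_as_complete_binary_tree := by
  unfold Claim_raises_get_array_print_string_as_complete_binary_tree
  exact ⟨fun a _ hr hp => hp hr, by decide⟩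

-- witness self-check: the crash-fix witness lies inside Raises_
theorem pvRaisesWitness_ok : Raises_get_array_print_string_as_complete_binary_tree
    pvRaiseWitness_get_array_print_string_as_complete_binary_tree :=
  get_array_print_string_as_complete_binary_tree_raises.2.2.1
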